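-- pv_equiv track=rewrite | github.com/efrainc/data_structures | parenthetics_extra/parenthetics_recursive.py | parenthetics
-- ===== SOURCE A (Python) =====
-- def parenthetics(text, open_parens=0):
--     """Determines if a string is "open", "balanced", or "broken" given a string.
--
--     Takes a unicode string (text) as input and returns one of
--     three possible values:
--     1 if the string is "open"
--         (there are open parens that are not closed)
--     0 if the string is "balanced"
--         (there are an equal number of matching open and closed parenthasis)
--     1 if the string is "broken"
--     (a closing parens has not been proceeded by one that opens)
--     """
--
--     # reached end of text block:
--     if not text and open_parens == 0:
--         return 0
--     elif not text and open_parens > 0: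
--         return 1
--
--     if text[0] == ')':
--         open_parens -= 1
--         # if there are more closed parens than open, return -1
--         if open_parens < 0:
--             return -1
--         return parenthetics(text[1:], open_parens)
--     elif text[0] == '(':
--         return parenthetics(text[1:], open_parens+1)
--     else:
--         return parenthetics(text[1:], open_parens)
-- ===== SOURCE B (Python) =====
-- def parenthetics(text, open_parens=0):
--     """Single O(n) pass: track the running open-count and the lowest count
--     reached immediately after a closing paren; broken iff that dips below 0."""
--     count = open_parens
--     lowest = 0
--     for ch in text:
--         if ch == '(':
--             count += 1
--         elif ch == ')':
--             count -= 1
--             if count < lowest: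
--                 lowest = count
--     if lowest < 0:
--         return -1
--     if count == 0:
--         return 0
--     return 1 if count > 0 else -1
-- ===== Notes on version B (the rewrite author's own statement) =====
-- stated objective: faster
-- what changed: Replaced the quadratic recursion, which re-slices text[1:] at every step, by a single linear left-to-right fold tracking the running open-count together with the lowest count reached immediately after a closing paren, classifying once at the end; Pre_ excludes only the inputs where A raises IndexError (no closing paren in text and open_parens plus the number of opening parens negative), where B returns -1.
import Mathlib
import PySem

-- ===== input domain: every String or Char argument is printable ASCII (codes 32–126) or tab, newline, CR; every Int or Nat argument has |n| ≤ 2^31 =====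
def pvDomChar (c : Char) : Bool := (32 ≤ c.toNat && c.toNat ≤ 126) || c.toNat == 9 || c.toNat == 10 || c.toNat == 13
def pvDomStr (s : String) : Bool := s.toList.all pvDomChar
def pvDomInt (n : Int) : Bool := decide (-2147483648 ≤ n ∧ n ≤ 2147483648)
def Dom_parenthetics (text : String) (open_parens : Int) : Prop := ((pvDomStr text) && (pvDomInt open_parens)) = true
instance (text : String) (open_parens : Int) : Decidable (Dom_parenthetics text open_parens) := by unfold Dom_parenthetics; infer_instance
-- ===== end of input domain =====

-- B replaces A's O(n^2) slicing recursion by one O(n) left fold tracking (count, lowest-after-close); return value only.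


-- ===== PORT A =====
-- A, step for step on the character list: the two empty-text guards, then the
-- branch on text[0] and the recursive call on text[1:].
def parentheticsA : List Char → Int → Int
  | [], op =>
    if op = 0 then 0
    else if 0 < op then 1
    else 0  -- Python: text[0] on the empty string raises IndexError here (excluded by Pre_)
  | c :: rest, op =>
    if c = ')' then
      if op - 1 < 0 then -1
      else parentheticsA rest (op - 1)
    else if c = '(' then parentheticsA rest (op + 1)
    else parentheticsA rest op

def parenthetics (text : String) (open_parens : Int) : Int :=
  parentheticsA text.toList open_parens

-- ===== PORT B =====
-- one fold step of B's loop over the state (count, lowest)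
def parentheticsStep (s : Int × Int) (ch : Char) : Int × Int :=
  if ch = '(' then (s.1 + 1, s.2)
  else if ch = ')' then
    (s.1 - 1, if s.1 - 1 < s.2 then s.1 - 1 else s.2)
  else s

def parenthetics_alt (text : String) (open_parens : Int) : Int :=
  let s := text.toList.foldl parentheticsStep (open_parens, 0)
  if s.2 < 0 then -1
  else if s.1 = 0 then 0
  else if 0 < s.1 then 1
  else -1

-- ===== PRECONDITION & SPEC =====
-- Pre_ excludes exactly the inputs on which A raises IndexError (text without
-- any ')' whose '(' count cannot bring a negative open_parens back to ≥ 0: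
-- the recursion then reaches the empty string with a negative count and
-- evaluates ""[0]); A returns a value on every input admitted by Pre_.
def Pre_parenthetics (text : String) (open_parens : Int) : Prop :=
  ')' ∈ text.toList ∨ 0 ≤ open_parens + (text.toList.count '(' : Int)
instance (text : String) (open_parens : Int) : Decidable (Pre_parenthetics text open_parens) := by
  unfold Pre_parenthetics; infer_instance

def pvWitness_parenthetics : String × Int := ("(()", 0)

def Spec_parenthetics (text : String) (open_parens : Int) (out : Int) : Prop := out = parenthetics_alt text open_parens
instance (text : String) (open_parens : Int) (out : Int) : Decidable (Spec_parenthetics text open_parens out) := by unfold Spec_parenthetics; infer_instance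

-- ===== CLAIM (what is proved, stated in full; the proofs are below) =====
def Claim_equal_parenthetics : Prop := ∀ (text : String) (open_parens : Int), Dom_parenthetics text open_parens → Pre_parenthetics text open_parens → Spec_parenthetics text open_parens (parenthetics text open_parens)
-- ===== LEMMAS AND PROOFS =====

-- once B's lowest is negative it stays negative
lemma lowest_stays_neg (cs : List Char) : ∀ (c l : Int), l < 0 →
    (cs.foldl parentheticsStep (c, l)).2 < 0 := by
  induction cs with
  | nil => intro c l h; simpa using h
  | cons ch rest ih =>
    intro c l h
    simp only [List.foldl_cons, parentheticsStep]
    split_ifs <;> apply ih <;> omega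

-- core invariant: A's recursion equals B's fold-and-classify, for any
-- nonnegative starting `lowest`, on inputs where A returns
lemma core (cs : List Char) : ∀ (op l : Int), 0 ≤ l →
    (')' ∈ cs ∨ 0 ≤ op + (cs.count '(' : Int)) →
    parentheticsA cs op =
      (let s := cs.foldl parentheticsStep (op, l);
        if s.2 < 0 then -1 else if s.1 = 0 then 0 else if 0 < s.1 then 1 else -1) := by
  induction cs with
  | nil =>
    intro op l hl hpre
    simp only [List.mem_nil_iff, List.count_nil, false_or] at hpre
    simp only [List.foldl_nil, parentheticsA]
    push_cast at hpre
    split_ifs <;> omega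
  | cons ch rest ih =>
    intro op l hl hpre
    by_cases hc : ch = ')'
    · subst hc
      rw [List.foldl_cons]
      simp only [parentheticsA, parentheticsStep,
        if_neg (show ¬ ((')' : Char) = '(') by decide), if_true]
      by_cases hneg : op - 1 < 0
      · rw [if_pos hneg]
        have hneg2 := lowest_stays_neg rest (op - 1) (if op - 1 < l then op - 1 else l)
          (by split_ifs <;> omega)
        simp only [if_pos hneg2]
      · rw [if_neg hneg,
          ih (op - 1) (if op - 1 < l then op - 1 else l) (by split_ifs <;> omega)
            (Or.inr (by omega))]
    · by_cases ho : ch = '('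
      · subst ho
        rw [List.foldl_cons]
        simp only [parentheticsA, parentheticsStep,
          if_neg (show ¬ (('(' : Char) = ')') by decide), if_true]
        refine ih (op + 1) l hl ?_
        rcases hpre with h | h
        · rcases List.mem_cons.mp h with h1 | h1
          · exact absurd h1 (by decide)
          · exact Or.inl h1
        · right
          rw [List.count_cons] at h
          simp only [BEq.rfl, if_true] at h
          push_cast at h ⊢; omega
      · rw [List.foldl_cons]
        simp only [parentheticsA, parentheticsStep, if_neg hc, if_neg ho]
        refine ih op l hl ?_
        rcases hpre with h | h
        · rcases List.mem_cons.mp h with h1 | h1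
          · exact absurd h1.symm hc
          · exact Or.inl h1
        · right
          rw [List.count_cons] at h
          have hb : (ch == '(') = false := by simpa using ho
          rw [hb] at h
          simpa using h

-- ===== VERDICT (by name: the statement is the Claim_ definition above) =====
theorem parenthetics_spec : Claim_equal_parenthetics := by
  intro text op _ hpre
  unfold Spec_parenthetics parenthetics parenthetics_alt
  exact core text.toList op 0 le_rfl hpre
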